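-- pv_equiv track=rewrite | github.com/Thom2503/plants | test.py | apply_context_sensitive_lsystem
-- ===== SOURCE A (Python) =====
-- from typing import LiteralString
--
-- def apply_context_sensitive_lsystem(
--     input_string,
--     rules,
--     ignore_symbols
-- ) -> LiteralString:
--     """
--     Apply context-sensitive production rules to an L-system string.
--
--     :param input_string: The string to transform.
--     :param rules: A dictionary of rules in the form {(left_context, symbol, right_context): replacement}.
--     :param ignore_symbols: A set of symbols to ignore during context matching.
--     :return: The transformed string.
--     """
--     output = []
--     n = len(input_string)
--
--     for i in range(n):
--         symbol = input_string[i]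
--
--         # Skip ignored symbols
--         if symbol in ignore_symbols:
--             output.append(symbol)
--             continue
--
--         # Determine the effective left and right context, skipping ignored symbols
--         left_context = None
--         for j in range(i - 1, -1, -1):
--             if input_string[j] not in ignore_symbols:
--                 left_context = input_string[j]
--                 break
--
--         right_context = None
--         for j in range(i + 1, n):
--             if input_string[j] not in ignore_symbols:
--                 right_context = input_string[j]
--                 break
--
--         # Check if a rule exists for this context
--         matched_rule = False
--         for (left, center, right), replacement in rules.items():
--             if (left == left_context or left is None) and \
--                (center == symbol) and \
--                (right == right_context or right is None):
--                 output.append(replacement)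
--                 matched_rule = True
--                 break
--
--         # If no rule matched, apply the identity transformation
--         if not matched_rule:
--             output.append(symbol)
--
--     return ''.join(output)
-- ===== SOURCE B (Python) =====
-- def apply_context_sensitive_lsystem(input_string, rules, ignore_symbols):
--     n = len(input_string)
--     # one forward pass: nearest non-ignored symbol to the left of each index
--     lefts = []
--     last = None
--     for ch in input_string:
--         lefts.append(last)
--         if ch not in ignore_symbols:
--             last = ch
--     # one backward pass: nearest non-ignored symbol to the right of each index
--     rights = [None] * n
--     last = None
--     for i in range(n - 1, -1, -1):
--         ch = input_string[i]
--         rights[i] = last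
--         if ch not in ignore_symbols:
--             last = ch
--     out = []
--     for symbol, lc, rc in zip(input_string, lefts, rights):
--         if symbol in ignore_symbols:
--             out.append(symbol)
--         else:
--             out.append(next(
--                 (rep for (left, center, right), rep in rules.items()
--                  if (left == lc or left is None)
--                  and center == symbol
--                  and (right == rc or right is None)),
--                 symbol))
--     return ''.join(out)
-- ===== Notes on version B (the rewrite author's own statement) =====
-- stated objective: alternative
-- what changed: B precomputes the nearest non-ignored neighbour on each side of every index in one forward and one backward sweep and then transforms the string in a single zip pass with a find-first rule lookup, instead of A's per-index backward/forward context scans with an inline rule loop.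
import Mathlib
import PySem

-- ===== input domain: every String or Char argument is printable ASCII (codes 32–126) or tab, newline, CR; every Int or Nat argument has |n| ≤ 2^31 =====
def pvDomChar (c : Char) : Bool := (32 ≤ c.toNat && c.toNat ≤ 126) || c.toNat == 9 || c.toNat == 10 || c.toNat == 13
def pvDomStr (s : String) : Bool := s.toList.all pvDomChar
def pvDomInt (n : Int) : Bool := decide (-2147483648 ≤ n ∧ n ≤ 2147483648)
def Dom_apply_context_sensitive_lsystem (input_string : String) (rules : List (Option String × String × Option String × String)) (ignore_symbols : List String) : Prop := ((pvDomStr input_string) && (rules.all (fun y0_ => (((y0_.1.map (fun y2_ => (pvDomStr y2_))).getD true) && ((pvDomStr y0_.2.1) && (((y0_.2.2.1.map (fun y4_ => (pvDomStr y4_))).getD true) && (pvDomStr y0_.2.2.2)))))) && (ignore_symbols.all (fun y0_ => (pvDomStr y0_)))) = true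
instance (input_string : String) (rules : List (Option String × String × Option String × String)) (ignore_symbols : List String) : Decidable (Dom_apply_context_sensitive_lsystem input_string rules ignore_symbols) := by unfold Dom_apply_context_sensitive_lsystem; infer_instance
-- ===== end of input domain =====

-- B precomputes each index's nearest non-ignored left/right neighbour in two sweeps instead of
-- A's per-index context scans; the two ports are proved to return the same string on every input.
-- ===== PORT A =====
-- for j in range(i-1,-1,-1): first non-ignored symbol, scanning left from index i-1
def pvALeft (cs : List Char) (ign : List String) : Nat -> Option String
  | 0 => none
  | j+1 =>
      let s := String.mk [cs.getD j ' ']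
      if ign.contains s then pvALeft cs ign j else some s

-- for j in range(i+1,n): first non-ignored symbol in the remaining suffix
def pvARight (ign : List String) : List Char -> Option String
  | [] => none
  | c :: rest =>
      let s := String.mk [c]
      if ign.contains s then pvARight ign rest else some s

-- for (left, center, right), replacement in rules.items(): ... break
def pvARules (lc rc : Option String) (sym : String) :
    List (Option String × String × Option String × String) -> Option String
  | [] => none
  | (l, c, r, rep) :: rest =>
      if (l == lc || l == none) && c == sym && (r == rc || r == none) then some rep
      else pvARules lc rc sym rest

def apply_context_sensitive_lsystem (input_string : String) (rules : List (Option String × String × Option String × String)) (ignore_symbols : List String) : String :=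
  let cs := input_string.toList
  let n := cs.length
  let output := (List.range n).foldl (fun (out : List String) i =>
    let symbol := String.mk [cs.getD i ' ']
    if ignore_symbols.contains symbol then out ++ [symbol]
    else
      let left_context := pvALeft cs ignore_symbols i
      let right_context := pvARight ignore_symbols (cs.drop (i+1))
      match pvARules left_context right_context symbol rules with
      | some replacement => out ++ [replacement]
      | none => out ++ [symbol]) []
  String.join output

-- ===== PORT B =====
def apply_context_sensitive_lsystem_alt (input_string : String) (rules : List (Option String × String × Option String × String)) (ignore_symbols : List String) : String :=
  let cs := input_string.toList
  -- forward pass: lefts[i] = nearest non-ignored symbol left of i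
  let lefts := (cs.foldl (fun (acc : List (Option String) × Option String) c =>
      let s := String.mk [c]
      (acc.1 ++ [acc.2], if ignore_symbols.contains s then acc.2 else some s)) ([], none)).1
  -- backward pass: rights[i] = nearest non-ignored symbol right of i
  let rights := (cs.foldr (fun c (acc : List (Option String) × Option String) =>
      let s := String.mk [c]
      (acc.2 :: acc.1, if ignore_symbols.contains s then acc.2 else some s)) ([], none)).1
  let out := (cs.zip (lefts.zip rights)).map (fun (t : Char × Option String × Option String) =>
      let symbol := String.mk [t.1]
      if ignore_symbols.contains symbol then symbol
      else
        match rules.find? (fun q =>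
            (q.1 == t.2.1 || q.1 == none) && q.2.1 == symbol && (q.2.2.1 == t.2.2 || q.2.2.1 == none)) with
        | some q => q.2.2.2
        | none => symbol)
  String.join out

-- ===== PRECONDITION & SPEC =====
def Spec_apply_context_sensitive_lsystem (input_string : String) (rules : List (Option String × String × Option String × String)) (ignore_symbols : List String) (out : String) : Prop := out = apply_context_sensitive_lsystem_alt input_string rules ignore_symbols
instance (input_string : String) (rules : List (Option String × String × Option String × String)) (ignore_symbols : List String) (out : String) : Decidable (Spec_apply_context_sensitive_lsystem input_string rules ignore_symbols out) := by unfold Spec_apply_context_sensitive_lsystem; infer_instance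

-- ===== CLAIM (what is proved, stated in full; the proofs are below) =====
def Claim_equal_apply_context_sensitive_lsystem : Prop := ∀ (input_string : String) (rules : List (Option String × String × Option String × String)) (ignore_symbols : List String), Dom_apply_context_sensitive_lsystem input_string rules ignore_symbols → Spec_apply_context_sensitive_lsystem input_string rules ignore_symbols (apply_context_sensitive_lsystem input_string rules ignore_symbols)

-- ===== LEMMAS AND PROOFS =====

-- the single-step update of the "last non-ignored symbol" state
def pvStep (ign : List String) (last : Option String) (c : Char) : Option String :=
  if ign.contains (String.mk [c]) then last else some (String.mk [c])

-- state of B's forward fold after consuming a list, from an arbitrary start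
def pvLastNI (ign : List String) : List Char → Option String → Option String
  | [], last => last
  | c :: t, last => pvLastNI ign t (pvStep ign last c)

def pvLeftsList (ign : List String) : List Char → Option String → List (Option String)
  | [], _ => []
  | c :: t, last => last :: pvLeftsList ign t (pvStep ign last c)

def pvRightsList (ign : List String) : List Char → List (Option String)
  | [] => []
  | _ :: t => pvARight ign t :: pvRightsList ign t

theorem pvFoldlLefts (ign : List String) (cs : List Char) :
    ∀ (acc : List (Option String)) (last : Option String),
    cs.foldl (fun (acc : List (Option String) × Option String) c =>
        let s := String.mk [c]
        (acc.1 ++ [acc.2], if ign.contains s then acc.2 else some s)) (acc, last)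
      = (acc ++ pvLeftsList ign cs last, pvLastNI ign cs last) := by
  induction cs with
  | nil => intro acc last; simp [pvLeftsList, pvLastNI]
  | cons c t ih =>
      intro acc last
      simp only [List.foldl_cons, pvLeftsList, pvLastNI, pvStep]
      rw [ih]
      simp

theorem pvFoldrRights (ign : List String) (cs : List Char) :
    cs.foldr (fun c (acc : List (Option String) × Option String) =>
        let s := String.mk [c]
        (acc.2 :: acc.1, if ign.contains s then acc.2 else some s)) ([], none)
      = (pvRightsList ign cs, pvARight ign cs) := by
  induction cs with
  | nil => simp [pvRightsList, pvARight]
  | cons c t ih =>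
      simp only [List.foldr_cons, ih, pvRightsList, pvARight]

theorem pvLastNI_append (ign : List String) (l : List Char) (c : Char) (last : Option String) :
    pvLastNI ign (l ++ [c]) last = pvStep ign (pvLastNI ign l last) c := by
  induction l generalizing last with
  | nil => simp [pvLastNI]
  | cons d t ih => simp [pvLastNI, ih]

theorem pvALeft_eq (ign : List String) (cs : List Char) :
    ∀ i, i ≤ cs.length → pvALeft cs ign i = pvLastNI ign (cs.take i) none := by
  intro i
  induction i with
  | zero => intro _; simp [pvALeft, pvLastNI]
  | succ j ih =>
      intro hij
      have hj : j < cs.length := Nat.lt_of_succ_le hij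
      have htake : cs.take (j+1) = cs.take j ++ [cs[j]] := List.take_succ_eq_append_getElem hj
      rw [htake, pvLastNI_append, ← ih (Nat.le_of_lt hj)]
      simp [pvALeft, pvStep, List.getElem?_eq_getElem hj]

theorem pvLeftsList_eq_map (ign : List String) (cs : List Char) :
    ∀ last, pvLeftsList ign cs last
      = (List.range cs.length).map (fun i => pvLastNI ign (cs.take i) last) := by
  induction cs with
  | nil => intro last; simp [pvLeftsList]
  | cons c t ih =>
      intro last
      simp only [pvLeftsList, List.length_cons, List.range_succ_eq_map, List.map_cons,
        List.map_map, List.take_zero]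
      refine List.cons_eq_cons.mpr ⟨rfl, ?_⟩
      rw [ih (pvStep ign last c)]
      apply List.map_congr_left
      intro i _
      simp [pvLastNI, List.take_succ_cons, Function.comp]

theorem pvRightsList_eq_map (ign : List String) (cs : List Char) :
    pvRightsList ign cs
      = (List.range cs.length).map (fun i => pvARight ign (cs.drop (i+1))) := by
  induction cs with
  | nil => simp [pvRightsList]
  | cons c t ih =>
      simp only [pvRightsList, List.length_cons, List.range_succ_eq_map, List.map_cons,
        List.map_map]
      refine List.cons_eq_cons.mpr ⟨by simp, ?_⟩
      rw [ih]
      apply List.map_congr_left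
      intro i _
      simp [Function.comp]

theorem pvARules_eq_find? (lc rc : Option String) (sym : String)
    (rules : List (Option String × String × Option String × String)) :
    pvARules lc rc sym rules
      = (rules.find? (fun q =>
          (q.1 == lc || q.1 == none) && q.2.1 == sym && (q.2.2.1 == rc || q.2.2.1 == none))).map
          (fun q => q.2.2.2) := by
  induction rules with
  | nil => simp [pvARules]
  | cons q rest ih =>
      obtain ⟨l, c, r, rep⟩ := q
      have e : pvARules lc rc sym ((l, c, r, rep) :: rest)
          = if ((l == lc || l == none) && c == sym && (r == rc || r == none)) then some rep
            else pvARules lc rc sym rest := rfl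
      cases hb : ((l == lc || l == none) && c == sym && (r == rc || r == none)) with
      | true =>
          have hf : List.find? (fun q =>
              (q.1 == lc || q.1 == none) && q.2.1 == sym && (q.2.2.1 == rc || q.2.2.1 == none))
              ((l, c, r, rep) :: rest) = some (l, c, r, rep) :=
            List.find?_cons_of_pos hb
          rw [e, if_pos hb, hf]
          rfl
      | false =>
          have hf : List.find? (fun q =>
              (q.1 == lc || q.1 == none) && q.2.1 == sym && (q.2.2.1 == rc || q.2.2.1 == none))
              ((l, c, r, rep) :: rest)
              = List.find? (fun q =>
                (q.1 == lc || q.1 == none) && q.2.1 == sym && (q.2.2.1 == rc || q.2.2.1 == none)) rest :=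
            List.find?_cons_of_neg (ne_true_of_eq_false hb)
          rw [e, if_neg (ne_true_of_eq_false hb), hf, ih]

theorem pvFoldlSnoc {α β : Type} (g : α → β) (step : List β → α → List β)
    (h : ∀ (a : List β) (x : α), step a x = a ++ [g x]) :
    ∀ (l : List α) (acc : List β), l.foldl step acc = acc ++ l.map g := by
  intro l
  induction l with
  | nil => intro acc; simp
  | cons x t ih => intro acc; simp [h, ih]

-- ===== VERDICT (by name: the statement is the Claim_ definition above) =====
theorem apply_context_sensitive_lsystem_spec : Claim_equal_apply_context_sensitive_lsystem := by
  intro input_string rules ignore_symbols _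
  unfold Spec_apply_context_sensitive_lsystem
  unfold apply_context_sensitive_lsystem apply_context_sensitive_lsystem_alt
  set cs := input_string.toList with hcs
  set n := cs.length with hn
  simp only [pvFoldlLefts, pvFoldrRights, List.nil_append]
  -- turn A's fold into a map over range n
  rw [pvFoldlSnoc (fun i =>
        if ignore_symbols.contains (String.mk [cs.getD i ' ']) then String.mk [cs.getD i ' ']
        else
          match pvARules (pvALeft cs ignore_symbols i)
              (pvARight ignore_symbols (cs.drop (i+1))) (String.mk [cs.getD i ' ']) rules with
          | some replacement => replacement
          | none => String.mk [cs.getD i ' '])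
      _ (fun a i => by
          by_cases h : String.mk [(cs[i]?).getD ' '] ∈ ignore_symbols <;>
            cases he : pvARules (pvALeft cs ignore_symbols i)
                (pvARight ignore_symbols (cs.drop (i+1))) (String.mk [(cs[i]?).getD ' ']) rules <;>
            simp [h, he])]
  simp only [List.nil_append]
  congr 1
  apply List.ext_getElem
  · simp [pvLeftsList_eq_map, pvRightsList_eq_map]
  · intro i h1 h2
    have hi : i < n := by simpa using h1
    simp only [List.getElem_map, List.getElem_range, List.getElem_zip,
      pvLeftsList_eq_map, pvRightsList_eq_map]
    rw [List.getD_eq_getElem cs ' ' hi]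
    by_cases hc : String.mk [cs[i]] ∈ ignore_symbols
    · simp [hc]
    · rw [pvARules_eq_find?, pvALeft_eq ignore_symbols cs i (Nat.le_of_lt hi)]
      simp [hc]
      cases hfind : List.find? (fun q =>
          (q.1 == pvLastNI ignore_symbols (List.take i cs) none || q.1.isNone)
            && q.2.1 == String.mk [cs[i]]
            && (q.2.2.1 == pvARight ignore_symbols (List.drop (i+1) cs) || q.2.2.1.isNone)) rules
      · simp
      · simp [hfind]
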